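-- pv_equiv track=rewrite | github.com/gdszyy/ai-secretary-architecture | scripts/weekly_issue_reminder.py | build_card_body
-- ===== SOURCE A (Python) =====
-- MODULE_LABELS = {
--     "mod_data_ingestion":      "数据接入",
--     "mod_ls_ts_matching":      "Lsport 赛事匹配",
--     "mod_sr_ts_matching":      "SR 赛事匹配",
--     "mod_sports_betting_core": "体育投注核心",
--     "mod_casino":              "Casino",
--     "mod_activity_platform":   "活动平台",
--     "mod_ads_system":          "广告投放",
--     "mod_uiux_design":         "UI/UX 设计",
--     "mod_user_system":         "用户系统",
--     "mod_wallet_finance":      "钱包与财务",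
--     "mod_platform_setting":    "平台配置",
--     "mod_im_cs":               "IM 客服",
--     "数据源":                  "数据源",
--     "体育博彩核心":             "体育投注核心",
--     "活动平台":                 "活动平台",
--     "活动管理":                 "活动管理",
--     "游戏模块":                 "Casino",
--     "游戏（Casino）":           "Casino",
--     "运营":                    "运营",
--     "风控":                    "风控",
--     "后台管理":                 "后台管理",
--     "支付系统":                 "支付系统",
--     "标签系统":                 "标签系统",
--     "运营监控":                 "运营监控",
--     "运营活动平台":             "运营活动平台",
-- }
--
-- INTENT_LABELS = {
--     "major_decision": "🔵 重大决策",
--     "milestone_fact": "🟢 里程碑",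
--     "risk_blocker":   "🔴 风险/阻塞",
-- }
--
-- def build_card_body(
--     issues: list[dict],
--     current_week: str,
--     today_str: str,
-- ) -> str:
--     """
--     生成飞书卡片的 Markdown 正文。
--     """
--     if not issues:
--         return (
--             f"✅ **本周（{current_week}）暂无未解决的风险/阻塞项**，进展顺利！\n\n"
--             f"如有遗漏，请直接回复此卡片补充。"
--         )
--
--     lines = [
--         f"以下 **{len(issues)} 项**风险/阻塞尚未闭环，请相关负责人确认进度，争取**本周内解决**：\n",
--     ]
--
--     # 按模块分组
--     from collections import defaultdict
--     by_module = defaultdict(list)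
--     for issue in issues:
--         mod = MODULE_LABELS.get(issue["module"], issue["module"])
--         by_module[mod].append(issue)
--
--     for mod, items in sorted(by_module.items()):
--         lines.append(f"**【{mod}】**")
--         for item in items:
--             intent_label = INTENT_LABELS.get(item["intent"], item["intent"])
--             lines.append(f"- {intent_label} **{item['title']}**")
--             if item.get("summary"):
--                 # 摘要截取前 60 字
--                 summary = item["summary"][:60].replace("\n", " ")
--                 if len(item["summary"]) > 60:
--                     summary += "…"
--                 lines.append(f"  > {summary}")
--         lines.append("")
--
--     # 信息纠正入口
--     lines.append("---")
--     lines.append("**📝 信息纠正 / 补充入口**")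
--     lines.append(
--         "如果 AI 提取的信息有偏差，或有群外决策未被记录，"
--         "请直接回复本卡片，格式：\n"
--         "> `纠正：[话题名] 实际情况是……`\n"
--         "> `补充：[新话题] 决策/进展是……`\n\n"
--         "AI 秘书将在下次运行时读取并更新记录。"
--     )
--
--     return "\n".join(lines)
-- ===== SOURCE B (Python) =====
-- MODULE_LABELS = {
--     "mod_data_ingestion":      "数据接入",
--     "mod_ls_ts_matching":      "Lsport 赛事匹配",
--     "mod_sr_ts_matching":      "SR 赛事匹配",
--     "mod_sports_betting_core": "体育投注核心",
--     "mod_casino":              "Casino",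
--     "mod_activity_platform":   "活动平台",
--     "mod_ads_system":          "广告投放",
--     "mod_uiux_design":         "UI/UX 设计",
--     "mod_user_system":         "用户系统",
--     "mod_wallet_finance":      "钱包与财务",
--     "mod_platform_setting":    "平台配置",
--     "mod_im_cs":               "IM 客服",
--     "数据源":                  "数据源",
--     "体育博彩核心":             "体育投注核心",
--     "活动平台":                 "活动平台",
--     "活动管理":                 "活动管理",
--     "游戏模块":                 "Casino",
--     "游戏（Casino）":           "Casino",
--     "运营":                    "运营",
--     "风控":                    "风控",
--     "后台管理":                 "后台管理",
--     "支付系统":                 "支付系统",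
--     "标签系统":                 "标签系统",
--     "运营监控":                 "运营监控",
--     "运营活动平台":             "运营活动平台",
-- }
--
-- INTENT_LABELS = {
--     "major_decision": "🔵 重大决策",
--     "milestone_fact": "🟢 里程碑",
--     "risk_blocker":   "🔴 风险/阻塞",
-- }
--
--
-- def _item_lines(item):
--     intent_label = INTENT_LABELS.get(item["intent"], item["intent"])
--     out = [f"- {intent_label} **{item['title']}**"]
--     if item.get("summary"):
--         summary = item["summary"][:60].replace("\n", " ")
--         if len(item["summary"]) > 60:
--             summary += "…"
--         out.append(f"  > {summary}")
--     return out
--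
--
-- def build_card_body(
--     issues: list[dict],
--     current_week: str,
--     today_str: str,
-- ) -> str:
--     """生成飞书卡片的 Markdown 正文（按模块标签分组，不经由 defaultdict）。"""
--     if not issues:
--         return (
--             f"✅ **本周（{current_week}）暂无未解决的风险/阻塞项**，进展顺利！\n\n"
--             f"如有遗漏，请直接回复此卡片补充。"
--         )
--
--     labeled = [(MODULE_LABELS.get(i["module"], i["module"]), i) for i in issues]
--
--     lines = [
--         f"以下 **{len(issues)} 项**风险/阻塞尚未闭环，请相关负责人确认进度，争取**本周内解决**：\n",
--     ]
--     for mod in sorted(set(l for l, _ in labeled)):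
--         lines.append(f"**【{mod}】**")
--         for item in (i for l, i in labeled if l == mod):
--             lines.extend(_item_lines(item))
--         lines.append("")
--
--     lines.append("---")
--     lines.append("**📝 信息纠正 / 补充入口**")
--     lines.append(
--         "如果 AI 提取的信息有偏差，或有群外决策未被记录，"
--         "请直接回复本卡片，格式：\n"
--         "> `纠正：[话题名] 实际情况是……`\n"
--         "> `补充：[新话题] 决策/进展是……`\n\n"
--         "AI 秘书将在下次运行时读取并更新记录。"
--     )
--
--     return "\n".join(lines)
-- ===== Notes on version B (the rewrite author's own statement) =====
-- stated objective: alternative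
-- what changed: Replaces the defaultdict grouping plus later key-sort with mapping each issue to its module label up front and iterating the sorted distinct labels, selecting each group's items by a filter over the labeled list (no dict is built).
import Mathlib
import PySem

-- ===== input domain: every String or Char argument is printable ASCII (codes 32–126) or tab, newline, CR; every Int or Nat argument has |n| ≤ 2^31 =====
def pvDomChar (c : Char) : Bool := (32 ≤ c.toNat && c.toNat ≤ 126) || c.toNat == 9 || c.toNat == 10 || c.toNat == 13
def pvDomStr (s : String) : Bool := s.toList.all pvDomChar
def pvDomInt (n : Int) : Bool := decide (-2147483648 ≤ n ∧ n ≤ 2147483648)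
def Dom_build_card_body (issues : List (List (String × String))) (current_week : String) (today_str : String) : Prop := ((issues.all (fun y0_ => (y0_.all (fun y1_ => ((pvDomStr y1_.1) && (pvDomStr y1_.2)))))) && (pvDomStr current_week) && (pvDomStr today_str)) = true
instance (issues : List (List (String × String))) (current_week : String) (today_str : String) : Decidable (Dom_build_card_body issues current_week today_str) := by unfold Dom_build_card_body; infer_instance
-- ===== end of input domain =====

-- B replaces A's defaultdict grouping + later key-sort by labelling each issue up front and
-- iterating the sorted distinct labels, filtering each group out of the labelled list (alternative decomposition, no dict).
-- Equivalence is about the return value only (neither version mutates its arguments).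

-- Shared module constants (MODULE_LABELS / INTENT_LABELS of the Python module)
def moduleLabels : PySem.Dict String String := PySem.Dict.ofList [
  ("mod_data_ingestion", "数据接入"), ("mod_ls_ts_matching", "Lsport 赛事匹配"),
  ("mod_sr_ts_matching", "SR 赛事匹配"), ("mod_sports_betting_core", "体育投注核心"),
  ("mod_casino", "Casino"), ("mod_activity_platform", "活动平台"),
  ("mod_ads_system", "广告投放"), ("mod_uiux_design", "UI/UX 设计"),
  ("mod_user_system", "用户系统"), ("mod_wallet_finance", "钱包与财务"),
  ("mod_platform_setting", "平台配置"), ("mod_im_cs", "IM 客服"),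
  ("数据源", "数据源"), ("体育博彩核心", "体育投注核心"), ("活动平台", "活动平台"),
  ("活动管理", "活动管理"), ("游戏模块", "Casino"), ("游戏（Casino）", "Casino"),
  ("运营", "运营"), ("风控", "风控"), ("后台管理", "后台管理"), ("支付系统", "支付系统"),
  ("标签系统", "标签系统"), ("运营监控", "运营监控"), ("运营活动平台", "运营活动平台")]

def intentLabels : PySem.Dict String String := PySem.Dict.ofList [
  ("major_decision", "🔵 重大决策"), ("milestone_fact", "🟢 里程碑"), ("risk_blocker", "🔴 风险/阻塞")]

-- issue[key]: Python raises KeyError when the key is missing; Pre_ excludes that, the fallback "" is never used inside Pre_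
def pyItem (issue : List (String × String)) (k : String) : String :=
  ((PySem.Dict.ofList issue).get? k).getD ""

-- MODULE_LABELS.get(issue["module"], issue["module"]) — used by both Pythons
def issueLabel (issue : List (String × String)) : String :=
  (moduleLabels.get? (pyItem issue "module")).getD (pyItem issue "module")

def emptyMsg (current_week : String) : String :=
  "✅ **本周（" ++ current_week ++ "）暂无未解决的风险/阻塞项**，进展顺利！\n\n如有遗漏，请直接回复此卡片补充。"

def headerLine (issues : List (List (String × String))) : String :=
  "以下 **" ++ PySem.Int.toStr (issues.length : Int) ++ " 项**风险/阻塞尚未闭环，请相关负责人确认进度，争取**本周内解决**：\n"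

def footerLines : List String :=
  ["---", "**📝 信息纠正 / 补充入口**",
   "如果 AI 提取的信息有偏差，或有群外决策未被记录，请直接回复本卡片，格式：\n> `纠正：[话题名] 实际情况是……`\n> `补充：[新话题] 决策/进展是……`\n\nAI 秘书将在下次运行时读取并更新记录。"]

-- ===== PORT A =====
def build_card_body (issues : List (List (String × String))) (current_week : String) (today_str : String) : String :=
  if issues = [] then emptyMsg current_week
  else
    let lines : List String := [headerLine issues]
    -- by_module = defaultdict(list); for issue in issues: by_module[MODULE_LABELS.get(issue["module"], issue["module"])].append(issue)
    let by_module : PySem.Dict String (List (List (String × String))) :=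
      issues.foldl (fun d issue => d.modify (issueLabel issue) [] (fun v => v ++ [issue])) PySem.Dict.empty
    -- for mod, items in sorted(by_module.items()):  (keys are distinct, so sorting the pairs compares only the keys)
    let lines := (PySem.List.sorted by_module.items (fun p => p.1)).foldl
      (fun ls p =>
        (p.2.foldl (fun ls2 item =>
          let intent_label := (intentLabels.get? (pyItem item "intent")).getD (pyItem item "intent")
          let ls2 := ls2 ++ ["- " ++ intent_label ++ " **" ++ pyItem item "title" ++ "**"]
          let s := ((PySem.Dict.ofList item).get? "summary").getD ""
          if s ≠ "" then
            let summary := PySem.Str.replace (PySem.Str.slice s none (some 60)) "\n" " "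
            let summary := if 60 < PySem.Str.len s then summary ++ "…" else summary
            ls2 ++ ["  > " ++ summary]
          else ls2)
          (ls ++ ["**【" ++ p.1 ++ "】**"])) ++ [""])
      lines
    PySem.Str.join "\n" (lines ++ footerLines)

-- ===== PORT B =====
-- _item_lines(item) of Source B
def itemLines (item : List (String × String)) : List String :=
  let intent_label := (intentLabels.get? (pyItem item "intent")).getD (pyItem item "intent")
  let out := ["- " ++ intent_label ++ " **" ++ pyItem item "title" ++ "**"]
  let s := ((PySem.Dict.ofList item).get? "summary").getD ""
  if s ≠ "" then
    let summary := PySem.Str.replace (PySem.Str.slice s none (some 60)) "\n" " "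
    let summary := if 60 < PySem.Str.len s then summary ++ "…" else summary
    out ++ ["  > " ++ summary]
  else out

def build_card_body_alt (issues : List (List (String × String))) (current_week : String) (today_str : String) : String :=
  if issues = [] then emptyMsg current_week
  else
    let labeled := issues.map (fun i => (issueLabel i, i))
    let lines : List String := [headerLine issues]
    -- for mod in sorted(set(l for l, _ in labeled)): … for item in (i for l, i in labeled if l == mod): lines.extend(_item_lines(item))
    let lines := (PySem.List.sorted (PySem.Set.ofList (labeled.map (fun p => p.1))) (fun x => x)).foldl
      (fun ls m =>
        (((labeled.filter (fun p => p.1 == m)).map (fun p => p.2)).foldl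
          (fun ls2 item => ls2 ++ itemLines item)
          (ls ++ ["**【" ++ m ++ "】**"])) ++ [""])
      lines
    PySem.Str.join "\n" (lines ++ footerLines)

-- ===== PRECONDITION & SPEC =====
-- Pre_ excludes exactly the inputs on which Python A raises KeyError: an issue dict missing "module", "intent" or "title".
def Pre_build_card_body (issues : List (List (String × String))) (current_week : String) (today_str : String) : Prop :=
  ∀ issue ∈ issues, (PySem.Dict.ofList issue).contains "module" = true ∧
    (PySem.Dict.ofList issue).contains "intent" = true ∧ (PySem.Dict.ofList issue).contains "title" = true
instance (issues : List (List (String × String))) (current_week : String) (today_str : String) : Decidable (Pre_build_card_body issues current_week today_str) := by unfold Pre_build_card_body; infer_instance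

def pvWitness_build_card_body : (List (List (String × String))) × String × String :=
  ([[("module", "mod_casino"), ("intent", "risk_blocker"), ("title", "t1"), ("summary", "s")],
    [("module", "other"), ("intent", "x"), ("title", "t2")]], "W32", "2024-08-05")

def Spec_build_card_body (issues : List (List (String × String))) (current_week : String) (today_str : String) (out : String) : Prop := out = build_card_body_alt issues current_week today_str
instance (issues : List (List (String × String))) (current_week : String) (today_str : String) (out : String) : Decidable (Spec_build_card_body issues current_week today_str out) := by unfold Spec_build_card_body; infer_instance

-- ===== CLAIM (what is proved, stated in full; the proofs are below) =====
def Claim_equal_build_card_body : Prop := ∀ (issues : List (List (String × String))) (current_week : String) (today_str : String), Dom_build_card_body issues current_week today_str → Pre_build_card_body issues current_week today_str → Spec_build_card_body issues current_week today_str (build_card_body issues current_week today_str)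

-- ===== LEMMAS AND PROOFS =====

theorem append_ite_list {α : Type} (c : Prop) [Decidable c] (a X Y : List α) :
    a ++ (if c then X else Y) = if c then a ++ X else a ++ Y := by
  split_ifs <;> rfl

theorem pvWitness_ok :
    Dom_build_card_body pvWitness_build_card_body.1 pvWitness_build_card_body.2.1 pvWitness_build_card_body.2.2 ∧
    Pre_build_card_body pvWitness_build_card_body.1 pvWitness_build_card_body.2.1 pvWitness_build_card_body.2.2 := by
  decide

-- A's by_module dict, characterised: keys = distinct labels in first-occurrence order, values = the filtered groups
theorem byModule_items (issues : List (List (String × String))) :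
    (issues.foldl (fun d issue => d.modify (issueLabel issue) [] (fun v => v ++ [issue]))
        (PySem.Dict.empty : PySem.Dict String (List (List (String × String))))).items =
      (PySem.Set.ofList (issues.map issueLabel)).map
        (fun k => (k, ((issues.map (fun i => (issueLabel i, i))).filter (fun p => p.1 == k)).map (fun p => p.2))) := by
  set F := fun (d : PySem.Dict String (List (List (String × String)))) (issue : List (String × String)) =>
      d.modify (issueLabel issue) [] (fun v => v ++ [issue]) with hF
  have hkeys : (issues.foldl F PySem.Dict.empty).keys = PySem.Set.ofList (issues.map issueLabel) := by
    have := PySem.Dict.keys_foldl_modify_key issues issueLabel ([] : List (List (String × String)))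
      (fun _ issue => (fun v => v ++ [issue])) PySem.Dict.empty
    simpa [hF, PySem.Dict.keys_empty, PySem.Set.update_nil_left] using this
  have hnodup : (issues.foldl F PySem.Dict.empty).keys.Nodup := by
    exact PySem.Dict.nodup_keys_foldl_modify_key issues issueLabel _ _ _ (by simp [PySem.Dict.keys_empty])
  have hitems := PySem.Dict.items_eq_map_keys (issues.foldl F PySem.Dict.empty) hnodup []
  rw [hitems, hkeys]
  apply List.map_congr_left
  intro k _
  have hfold : issues.foldl F PySem.Dict.empty =
      (issues.map (fun i => (issueLabel i, i))).foldl (fun d p => d.modify p.1 [] (fun v => v ++ [p.2])) PySem.Dict.empty := by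
    rw [List.foldl_map]
  have := PySem.Dict.getD_foldl_modify_append (issues.map (fun i => (issueLabel i, i)))
      (PySem.Dict.empty : PySem.Dict String (List (List (String × String)))) k
  simp only [hfold, this, PySem.Dict.getD_empty, List.nil_append]

-- the sorted items list of A's dict is the map over the sorted distinct labels
theorem sorted_byModule (issues : List (List (String × String))) :
    PySem.List.sorted
      ((issues.foldl (fun d issue => d.modify (issueLabel issue) [] (fun v => v ++ [issue]))
        (PySem.Dict.empty : PySem.Dict String (List (List (String × String))))).items) (fun p => p.1) =
    (PySem.List.sorted (PySem.Set.ofList (issues.map issueLabel)) (fun x => x)).map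
      (fun k => (k, ((issues.map (fun i => (issueLabel i, i))).filter (fun p => p.1 == k)).map (fun p => p.2))) := by
  rw [byModule_items]
  apply PySem.List.sorted_eq_of_perm_of_pairwise_lt
  · exact List.Perm.map _ (PySem.List.sorted_perm _ _ _)
  · rw [List.pairwise_map]
    exact PySem.List.sorted_ofList_pairwise_lt _

-- ===== VERDICT (by name: the statement is the Claim_ definition above) =====
theorem build_card_body_spec : Claim_equal_build_card_body := by
  intro issues current_week today_str _hDom _hPre
  unfold Spec_build_card_body build_card_body build_card_body_alt
  by_cases h : issues = []
  · simp [h]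
  · simp only [if_neg h]
    rw [sorted_byModule]
    rw [List.foldl_map]
    have hlab : (issues.map (fun i => (issueLabel i, i))).map (fun p => p.1) = issues.map issueLabel := by
      simp
    rw [hlab]
    simp only [itemLines, append_ite_list, List.append_assoc]
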